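-- pv_equiv track=rewrite | github.com/nds-group/Dune | model_partitioning/src/SPP/partitioning.py | generate_partitions_of_set
-- ===== SOURCE A (Python) =====
-- def generate_partitions_of_set(set_elements):
--     if not set_elements:
--         return [[]]
--
--     first_element = set_elements[0]
--     rest_partitions = generate_partitions_of_set(set_elements[1:])
--
--     new_partitions = []
--     for partition in rest_partitions:
--         for i in range(len(partition)):
--             new_partition = partition[:i] + [[first_element] + partition[i]] + partition[i + 1:]
--             new_partitions.append(new_partition)
--         new_partitions.append([[first_element]] + partition)
--
--     return new_partitions
-- ===== SOURCE B (Python) =====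
-- def generate_partitions_of_set(set_elements):
--     result = [[]]
--     for x in reversed(set_elements):
--         result = [q
--                   for p in result
--                   for q in ([p[:i] + [[x] + p[i]] + p[i+1:] for i in range(len(p))]
--                             + [[[x]] + p])]
--     return result
-- ===== Notes on version B (the rewrite author's own statement) =====
-- stated objective: alternative
-- what changed: Replaces A's head-recursion with appending loops by an iterative reversed-order fold that rebuilds the partition list via a flat comprehension (flatMap of per-partition insertion options).
import Mathlib
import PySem

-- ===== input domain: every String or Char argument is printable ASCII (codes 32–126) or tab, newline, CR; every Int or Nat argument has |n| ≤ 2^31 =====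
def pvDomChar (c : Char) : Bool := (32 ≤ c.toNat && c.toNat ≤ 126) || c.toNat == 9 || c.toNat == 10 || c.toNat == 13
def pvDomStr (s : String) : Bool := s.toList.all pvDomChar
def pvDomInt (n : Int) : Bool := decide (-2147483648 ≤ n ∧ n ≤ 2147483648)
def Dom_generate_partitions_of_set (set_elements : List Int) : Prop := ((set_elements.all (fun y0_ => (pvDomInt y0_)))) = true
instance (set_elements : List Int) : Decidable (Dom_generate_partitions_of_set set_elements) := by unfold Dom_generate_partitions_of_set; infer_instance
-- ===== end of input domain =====

-- B replaces A's head-recursion (nested appending loops) with an iterative fold over the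
-- reversed input that rebuilds the partition list by a flat comprehension; same return value.

-- ===== PORT A =====
-- literal transliteration of A: recursion on the head, outer loop over rest_partitions
-- appending, inner loop over range(len(partition)) appending the spliced partition.
def generate_partitions_of_set (set_elements : List Int) : List (List (List Int)) :=
  match set_elements with
  | [] => [[]]
  | first_element :: rest =>
    let rest_partitions := generate_partitions_of_set rest
    rest_partitions.foldl (fun new_partitions partition =>
      ((PySem.List.pyRange 0 (partition.length : Int) 1).foldl (fun acc i =>
          acc ++ [PySem.List.slice partition none (some i)
                  ++ [[first_element] ++ PySem.List.pyGetD partition i []]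
                  ++ PySem.List.slice partition (some (i + 1)) none]) new_partitions)
        ++ [[[first_element]] ++ partition]) []

-- ===== PORT B =====
-- per-partition options of Source B's inner comprehension; indices i are in range, so
-- p[:i]/p[i]/p[i+1:] are exactly take/getD/drop here.
def pvOptions (x : Int) (p : List (List Int)) : List (List (List Int)) :=
  (List.range p.length).map (fun i => p.take i ++ [[x] ++ p.getD i []] ++ p.drop (i + 1))
    ++ [[[x]] ++ p]

def generate_partitions_of_set_alt (set_elements : List Int) : List (List (List Int)) :=
  set_elements.reverse.foldl (fun result x => result.flatMap (pvOptions x)) [[]]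

-- ===== PRECONDITION & SPEC =====
def Spec_generate_partitions_of_set (set_elements : List Int) (out : List (List (List Int))) : Prop := out = generate_partitions_of_set_alt set_elements
instance (set_elements : List Int) (out : List (List (List Int))) : Decidable (Spec_generate_partitions_of_set set_elements out) := by unfold Spec_generate_partitions_of_set; infer_instance

-- ===== CLAIM (what is proved, stated in full; the proofs are below) =====
def Claim_equal_generate_partitions_of_set : Prop := ∀ (set_elements : List Int), Dom_generate_partitions_of_set set_elements → Spec_generate_partitions_of_set set_elements (generate_partitions_of_set set_elements)

-- ===== LEMMAS AND PROOFS =====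

-- A's inner loop over range(len(partition)) plus the trailing append equals pvOptions.
theorem inner_eq (x : Int) (p : List (List Int)) (acc : List (List (List Int))) :
    ((PySem.List.pyRange 0 (p.length : Int) 1).foldl (fun acc i =>
        acc ++ [PySem.List.slice p none (some i)
                ++ [[x] ++ PySem.List.pyGetD p i []]
                ++ PySem.List.slice p (some (i + 1)) none]) acc)
      ++ [[[x]] ++ p] = acc ++ pvOptions x p := by
  rw [PySem.List.foldl_append_singleton_eq_map, PySem.List.pyRange_zero_nat]
  unfold pvOptions
  rw [List.map_map, List.append_assoc]
  congr 2
  refine List.map_congr_left (fun k hk => ?_)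
  have hk' : k < p.length := List.mem_range.mp hk
  simp [PySem.List.slice_to_natCast, PySem.List.pyGetD_natCast]
  norm_cast
  rw [PySem.List.slice_from_natCast]

theorem a_cons (x : Int) (rest : List Int) :
    generate_partitions_of_set (x :: rest)
      = (generate_partitions_of_set rest).flatMap (pvOptions x) := by
  show (generate_partitions_of_set rest).foldl _ [] = _
  have h : ∀ (ps acc : List (List (List Int))),
      ps.foldl (fun new_partitions partition =>
        ((PySem.List.pyRange 0 (partition.length : Int) 1).foldl (fun acc i =>
            acc ++ [PySem.List.slice partition none (some i)
                    ++ [[x] ++ PySem.List.pyGetD partition i []]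
                    ++ PySem.List.slice partition (some (i + 1)) none]) new_partitions)
          ++ [[[x]] ++ partition]) acc = acc ++ ps.flatMap (pvOptions x) := by
    intro ps
    induction ps with
    | nil => intro acc; simp
    | cons p ps ih =>
      intro acc
      simp only [List.foldl_cons, List.flatMap_cons]
      rw [inner_eq, ih, List.append_assoc]
  simpa using h (generate_partitions_of_set rest) []

theorem b_eq_a (xs : List Int) :
    generate_partitions_of_set_alt xs = generate_partitions_of_set xs := by
  induction xs with
  | nil => rfl
  | cons x rest ih =>
    unfold generate_partitions_of_set_alt at *
    rw [a_cons, List.reverse_cons, List.foldl_append, ih]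
    simp

-- ===== VERDICT (by name: the statement is the Claim_ definition above) =====
theorem generate_partitions_of_set_spec : Claim_equal_generate_partitions_of_set := by
  intro xs _
  exact (b_eq_a xs).symm
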